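-- pv_equiv track=rewrite | github.com/Shikher-jain/SJ_MAIN | CODEVITA  TCS/orchard7.py | countValidCombination
-- ===== SOURCE A (Python) =====
-- def countValidCombination(row):
--     n = len(row)
--     count = 0
--
--     for i in range(n - 2):
--         for j in range(i + 1, n - 1):
--             for k in range(j + 1, n):
--                 if (row[i] != row[j]) and (row[j] != row[k]):
--                     count += 1
--     return count
-- ===== SOURCE B (Python) =====
-- def countValidCombination(row):
--     n = len(row)
--     total = 0
--     for j in range(n):
--         v = row[j]
--         left = sum(1 for x in row[:j] if x != v)
--         right = sum(1 for x in row[j + 1:] if x != v)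
--         total += left * right
--     return total
-- ===== Notes on version B (the rewrite author's own statement) =====
-- stated objective: faster
-- what changed: Replaces the triple nested index loop with a single pass over the middle index j, multiplying the count of elements differing from row[j] on the left by the count on the right.
import Mathlib
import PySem

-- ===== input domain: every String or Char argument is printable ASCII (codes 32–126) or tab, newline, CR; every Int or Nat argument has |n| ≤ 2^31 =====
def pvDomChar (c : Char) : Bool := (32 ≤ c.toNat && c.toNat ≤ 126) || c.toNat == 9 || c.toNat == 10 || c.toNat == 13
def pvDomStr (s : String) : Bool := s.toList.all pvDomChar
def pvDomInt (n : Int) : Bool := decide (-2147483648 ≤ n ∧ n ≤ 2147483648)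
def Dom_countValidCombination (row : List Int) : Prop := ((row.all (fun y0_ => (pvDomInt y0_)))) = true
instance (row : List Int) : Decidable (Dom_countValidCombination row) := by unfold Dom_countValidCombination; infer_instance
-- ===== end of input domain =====

-- B replaces A's triple nested index loop by a single pass over the middle index j, adding
-- (#left elements ≠ row[j]) × (#right elements ≠ row[j]); objective: faster (O(n^2) vs O(n^3)).

-- ===== PORT A =====
def countValidCombination (row : List Int) : Int :=
  let n : Int := row.length
  (PySem.List.pyRange 0 (n - 2) 1).foldl (fun count i =>
    (PySem.List.pyRange (i + 1) (n - 1) 1).foldl (fun count j =>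
      (PySem.List.pyRange (j + 1) n 1).foldl (fun count k =>
        if PySem.List.pyGetD row i 0 ≠ PySem.List.pyGetD row j 0 ∧
           PySem.List.pyGetD row j 0 ≠ PySem.List.pyGetD row k 0 then count + 1 else count)
        count)
      count)
    0

-- ===== PORT B =====
def countValidCombination_alt (row : List Int) : Int :=
  let n : Int := row.length
  (PySem.List.pyRange 0 n 1).foldl (fun total j =>
    let v := PySem.List.pyGetD row j 0
    let left : Int := ((PySem.List.slice row none (some j)).countP (fun x => decide (x ≠ v)) : Int)
    let right : Int := ((PySem.List.slice row (some (j + 1)) none).countP (fun x => decide (x ≠ v)) : Int)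
    total + left * right)
    0

-- ===== PRECONDITION & SPEC =====
def Spec_countValidCombination (row : List Int) (out : Int) : Prop := out = countValidCombination_alt row
instance (row : List Int) (out : Int) : Decidable (Spec_countValidCombination row out) := by unfold Spec_countValidCombination; infer_instance

-- ===== CLAIM (what is proved, stated in full; the proofs are below) =====
def Claim_equal_countValidCombination : Prop := ∀ (row : List Int), Dom_countValidCombination row → Spec_countValidCombination row (countValidCombination row)

-- ===== LEMMAS AND PROOFS =====

-- value at a Nat index
def pvR (row : List Int) (i : ℕ) : Int := row.getD i 0

-- 0/1 indicator of "differing values"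
def pvU (row : List Int) (a b : ℕ) : Int := if pvR row a ≠ pvR row b then 1 else 0

-- bridge: list sum over List.range = Finset sum over range
theorem pv_list_sum_range (f : ℕ → Int) (n : ℕ) :
    ((List.range n).map f).sum = ∑ i ∈ Finset.range n, f i := by
  induction n with
  | zero => simp
  | succ m ih => rw [List.range_succ, Finset.sum_range_succ]; simp [ih]

-- a pyRange-1 loop that only accumulates is a Finset sum
theorem pv_foldl_pyRange_sum (a b : Int) (g : Int → Int) (c : Int) :
    (PySem.List.pyRange a b 1).foldl (fun c x => c + g x) c
      = c + ∑ k ∈ Finset.range (b - a).toNat, g (a + k) := by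
  rw [PySem.List.foldl_add, PySem.List.pyRange_one, List.map_map, pv_list_sum_range]
  rfl

theorem pv_cnt_take (l : List Int) (v : Int) :
    ∀ j, j ≤ l.length →
      (((l.take j).countP (fun x => decide (x ≠ v))) : Int)
        = ∑ i ∈ Finset.range j, (if l.getD i 0 ≠ v then 1 else 0) := by
  induction l with
  | nil =>
    intro j hj
    have hj0 : j = 0 := by simpa using hj
    subst hj0; simp
  | cons a t ih =>
    intro j hj
    cases j with
    | zero => simp
    | succ m =>
      rw [Finset.sum_range_succ']
      simp only [List.take_succ_cons, List.countP_cons, List.getD_cons_succ, List.getD_cons_zero]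
      rw [← ih m (by simpa using hj)]
      by_cases h : a = v <;> simp [h]

theorem pv_cnt_full (l : List Int) (v : Int) :
    ((l.countP (fun x => decide (x ≠ v))) : Int)
      = ∑ i ∈ Finset.range l.length, (if l.getD i 0 ≠ v then 1 else 0) := by
  simpa using pv_cnt_take l v l.length le_rfl

theorem pv_cnt_drop (l : List Int) (v : Int) :
    ∀ m, (((l.drop m).countP (fun x => decide (x ≠ v))) : Int)
      = ∑ k ∈ Finset.range (l.length - m), (if l.getD (m + k) 0 ≠ v then 1 else 0) := by
  induction l with
  | nil => intro m; simp
  | cons a t ih =>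
    intro m
    cases m with
    | zero => simpa using pv_cnt_full (a :: t) v
    | succ m' =>
      rw [List.drop_succ_cons, ih m',
        show (a :: t).length - (m' + 1) = t.length - m' by simp]
      exact Finset.sum_congr rfl (fun k _ => by
        rw [show m' + 1 + k = (m' + k) + 1 by omega, List.getD_cons_succ])

-- indicator of A's conjunction = product of the two pvU indicators
theorem pv_w_eq (row : List Int) (a b c : ℕ) :
    (if pvR row a ≠ pvR row b ∧ pvR row b ≠ pvR row c then (1 : Int) else 0)
      = pvU row a b * pvU row b c := by
  unfold pvU; by_cases h1 : pvR row a = pvR row b <;> by_cases h2 : pvR row b = pvR row c <;>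
    simp [h1, h2]

-- canonical triple sum
def pvA (row : List Int) : Int :=
  ∑ i ∈ Finset.range row.length, ∑ j ∈ Finset.Ico (i + 1) row.length,
    ∑ k ∈ Finset.Ico (j + 1) row.length, pvU row i j * pvU row j k

-- canonical product-form sum
def pvB (row : List Int) : Int :=
  ∑ j ∈ Finset.range row.length,
    (∑ i ∈ Finset.range j, pvU row i j) * (∑ k ∈ Finset.Ico (j + 1) row.length, pvU row j k)

theorem pvA_eq_pvB (row : List Int) : pvA row = pvB row := by
  unfold pvA pvB
  have h : ∀ j ∈ Finset.range row.length,
      (∑ i ∈ Finset.range j, pvU row i j) * (∑ k ∈ Finset.Ico (j + 1) row.length, pvU row j k)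
        = ∑ i ∈ Finset.range j, ∑ k ∈ Finset.Ico (j + 1) row.length, pvU row i j * pvU row j k := by
    intro j _; rw [Finset.sum_mul_sum]
  rw [Finset.sum_congr rfl h]
  have := Finset.sum_Ico_Ico_comm' 0 row.length
    (fun i j => ∑ k ∈ Finset.Ico (j + 1) row.length, pvU row i j * pvU row j k)
  simpa [← Finset.range_eq_Ico] using this

-- A's three-way indicator, on Int indices as port A computes it
def pvW (row : List Int) (i j k : Int) : Int :=
  if PySem.List.pyGetD row i 0 ≠ PySem.List.pyGetD row j 0 ∧
     PySem.List.pyGetD row j 0 ≠ PySem.List.pyGetD row k 0 then 1 else 0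

theorem pvW_cast (row : List Int) (a b c : ℕ) :
    pvW row (a : Int) (b : Int) (c : Int) = pvU row a b * pvU row b c := by
  rw [← pv_w_eq]; unfold pvW pvR; simp

-- pvA with the ranges truncated the way A's loops write them
theorem pvA_trunc (row : List Int) :
    pvA row = ∑ i ∈ Finset.range (row.length - 2), ∑ j ∈ Finset.Ico (i + 1) (row.length - 1),
      ∑ k ∈ Finset.Ico (j + 1) row.length, pvU row i j * pvU row j k := by
  unfold pvA
  have h1 : ∀ i : ℕ,
      (∑ j ∈ Finset.Ico (i + 1) row.length, ∑ k ∈ Finset.Ico (j + 1) row.length, pvU row i j * pvU row j k)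
        = ∑ j ∈ Finset.Ico (i + 1) (row.length - 1), ∑ k ∈ Finset.Ico (j + 1) row.length, pvU row i j * pvU row j k := by
    intro i
    refine (Finset.sum_subset (Finset.Ico_subset_Ico le_rfl (Nat.sub_le _ _)) ?_).symm
    intro j hj hj2
    rw [Finset.Ico_eq_empty (by simp only [Finset.mem_Ico] at hj hj2; omega), Finset.sum_empty]
  calc (∑ i ∈ Finset.range row.length, ∑ j ∈ Finset.Ico (i + 1) row.length,
          ∑ k ∈ Finset.Ico (j + 1) row.length, pvU row i j * pvU row j k)
      = ∑ i ∈ Finset.range row.length, ∑ j ∈ Finset.Ico (i + 1) (row.length - 1),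
          ∑ k ∈ Finset.Ico (j + 1) row.length, pvU row i j * pvU row j k :=
        Finset.sum_congr rfl (fun i _ => h1 i)
    _ = _ := by
        refine (Finset.sum_subset (Finset.range_subset.mpr (fun x hx => Finset.mem_range.mpr (by omega))) ?_).symm
        intro i hi hi2
        rw [Finset.Ico_eq_empty (by simp only [Finset.mem_range] at hi hi2; omega), Finset.sum_empty]

-- port A equals the canonical triple sum
theorem pv_portA (row : List Int) : countValidCombination row = pvA row := by
  have hk : ∀ (i j c : Int),
      (PySem.List.pyRange (j + 1) (row.length : Int) 1).foldl (fun count k =>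
        if PySem.List.pyGetD row i 0 ≠ PySem.List.pyGetD row j 0 ∧
           PySem.List.pyGetD row j 0 ≠ PySem.List.pyGetD row k 0 then count + 1 else count) c
        = c + ∑ t ∈ Finset.range ((row.length : Int) - (j + 1)).toNat, pvW row i j (j + 1 + t) := by
    intro i j c
    have hb : ∀ (acc : Int), ∀ k ∈ PySem.List.pyRange (j + 1) (row.length : Int) 1,
        (if PySem.List.pyGetD row i 0 ≠ PySem.List.pyGetD row j 0 ∧
            PySem.List.pyGetD row j 0 ≠ PySem.List.pyGetD row k 0 then acc + 1 else acc)
          = acc + pvW row i j k := by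
      intro acc k _; unfold pvW; split_ifs <;> ring
    rw [PySem.List.foldl_congr_mem _ _ _ _ hb, pv_foldl_pyRange_sum]
  have hj : ∀ (i c : Int),
      (PySem.List.pyRange (i + 1) ((row.length : Int) - 1) 1).foldl (fun count j =>
        (PySem.List.pyRange (j + 1) (row.length : Int) 1).foldl (fun count k =>
          if PySem.List.pyGetD row i 0 ≠ PySem.List.pyGetD row j 0 ∧
             PySem.List.pyGetD row j 0 ≠ PySem.List.pyGetD row k 0 then count + 1 else count) count) c
        = c + ∑ b ∈ Finset.range (((row.length : Int) - 1) - (i + 1)).toNat,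
            ∑ t ∈ Finset.range ((row.length : Int) - ((i + 1 + b) + 1)).toNat,
              pvW row i (i + 1 + b) ((i + 1 + b) + 1 + t) := by
    intro i c
    have hb : ∀ (acc : Int), ∀ j ∈ PySem.List.pyRange (i + 1) ((row.length : Int) - 1) 1,
        (PySem.List.pyRange (j + 1) (row.length : Int) 1).foldl (fun count k =>
          if PySem.List.pyGetD row i 0 ≠ PySem.List.pyGetD row j 0 ∧
             PySem.List.pyGetD row j 0 ≠ PySem.List.pyGetD row k 0 then count + 1 else count) acc
          = acc + ∑ t ∈ Finset.range ((row.length : Int) - (j + 1)).toNat, pvW row i j (j + 1 + t) :=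
      fun acc j _ => hk i j acc
    rw [PySem.List.foldl_congr_mem _ _ _ _ hb, pv_foldl_pyRange_sum]
  have hout :
      countValidCombination row
        = 0 + ∑ a ∈ Finset.range (((row.length : Int) - 2) - 0).toNat,
            ∑ b ∈ Finset.range (((row.length : Int) - 1) - ((0 + (a : Int)) + 1)).toNat,
              ∑ t ∈ Finset.range ((row.length : Int) - (((0 + (a : Int)) + 1 + b) + 1)).toNat,
                pvW row (0 + (a : Int)) ((0 + (a : Int)) + 1 + b) (((0 + (a : Int)) + 1 + b) + 1 + t) := by
    unfold countValidCombination
    simp only []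
    have hb : ∀ (acc : Int), ∀ i ∈ PySem.List.pyRange 0 ((row.length : Int) - 2) 1,
        (PySem.List.pyRange (i + 1) ((row.length : Int) - 1) 1).foldl (fun count j =>
          (PySem.List.pyRange (j + 1) (row.length : Int) 1).foldl (fun count k =>
            if PySem.List.pyGetD row i 0 ≠ PySem.List.pyGetD row j 0 ∧
               PySem.List.pyGetD row j 0 ≠ PySem.List.pyGetD row k 0 then count + 1 else count) count) acc
          = acc + ∑ b ∈ Finset.range (((row.length : Int) - 1) - (i + 1)).toNat,
              ∑ t ∈ Finset.range ((row.length : Int) - ((i + 1 + b) + 1)).toNat,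
                pvW row i (i + 1 + b) ((i + 1 + b) + 1 + t) :=
      fun acc i _ => hj i acc
    rw [PySem.List.foldl_congr_mem _ _ _ _ hb, pv_foldl_pyRange_sum]
  rw [hout, zero_add, pvA_trunc]
  rw [show (((row.length : Int) - 2) - 0).toNat = row.length - 2 by omega]
  refine Finset.sum_congr rfl ?_
  intro a ha
  rw [Finset.sum_Ico_eq_sum_range,
    show row.length - 1 - (a + 1) = (((row.length : Int) - 1) - ((0 + (a : Int)) + 1)).toNat by omega]
  refine Finset.sum_congr rfl ?_
  intro b hb
  rw [Finset.sum_Ico_eq_sum_range,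
    show row.length - (a + 1 + b + 1) = ((row.length : Int) - (((0 + (a : Int)) + 1 + b) + 1)).toNat by omega]
  refine Finset.sum_congr rfl ?_
  intro t ht
  rw [show (0 + (a : Int)) = ((a : ℕ) : Int) by ring,
    show ((a : ℕ) : Int) + 1 + (b : Int) = (((a + 1 + b : ℕ)) : Int) by push_cast; ring,
    show (((a + 1 + b : ℕ)) : Int) + 1 + (t : Int) = (((a + 1 + b + 1 + t : ℕ)) : Int) by push_cast; ring,
    pvW_cast]

-- port B equals the canonical product sum
theorem pv_portB (row : List Int) : countValidCombination_alt row = pvB row := by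
  unfold countValidCombination_alt
  simp only []
  rw [pv_foldl_pyRange_sum, zero_add, pvB,
    show (((row.length : Int)) - 0).toNat = row.length by omega]
  refine Finset.sum_congr rfl ?_
  intro j hj
  have hjlt : j < row.length := Finset.mem_range.mp hj
  rw [show ((0 : Int) + (j : Int)) = ((j : ℕ) : Int) by ring]
  rw [PySem.List.slice_to_natCast,
    show ((j : ℕ) : Int) + 1 = (((j + 1 : ℕ)) : Int) by push_cast; ring,
    PySem.List.slice_from_natCast]
  rw [PySem.List.pyGetD_natCast]
  rw [pv_cnt_take row (row.getD j 0) j (le_of_lt hjlt), pv_cnt_drop row (row.getD j 0) (j + 1)]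
  rw [Finset.sum_Ico_eq_sum_range]
  congr 1
  refine Finset.sum_congr rfl ?_
  intro k _
  unfold pvU pvR
  rcases eq_or_ne (row.getD (j + 1 + k) 0) (row.getD j 0) with h | h
  · rw [if_neg (not_not_intro h), if_neg (not_not_intro h.symm)]
  · rw [if_pos h, if_pos h.symm]

-- ===== VERDICT (by name: the statement is the Claim_ definition above) =====
theorem countValidCombination_spec : Claim_equal_countValidCombination := by
  intro row _
  unfold Spec_countValidCombination
  rw [pv_portA, pv_portB, pvA_eq_pvB]
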